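-- pv_equiv track=rewrite | github.com/gianluccacolangelo/HistoricEntropy | text_entropy.py | _get_topic_segments
-- ===== SOURCE A (Python) =====
-- from typing import List, Optional, Dict, Tuple
-- from collections import defaultdict
--
-- def _get_topic_segments(topic_labels: List[str]) -> Dict[str, List[Tuple[int, int]]]:
--     """
--     Find continuous stretches of text for each topic.
--
--     Args:
--         topic_labels: List of topic labels
--
--     Returns:
--         Dictionary mapping topics to lists of (start, end) positions
--     """
--     segments = defaultdict(list)
--     current_topic = None
--     start_pos = 0
--
--     for i, topic in enumerate(topic_labels):
--         if topic != current_topic: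
--             if current_topic is not None:
--                 segments[current_topic].append((start_pos, i))
--             current_topic = topic
--             start_pos = i
--
--     # Don't forget the last segment
--     if current_topic is not None:
--         segments[current_topic].append((start_pos, len(topic_labels)))
--
--     return segments
-- ===== SOURCE B (Python) =====
-- from collections import defaultdict
--
-- def _get_topic_segments(topic_labels):
--     segments = defaultdict(list)
--     n = len(topic_labels)
--     pos = 0
--     while pos < n:
--         label = topic_labels[pos]
--         end = pos + 1
--         while end < n and topic_labels[end] == label:
--             end += 1
--         segments[label].append((pos, end))
--         pos = end
--     return segments
-- ===== Notes on version B (the rewrite author's own statement) =====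
-- stated objective: simpler
-- what changed: Replaces A's state-machine fold (current_topic/start_pos carried across iterations plus a post-loop flush for the last run) with a two-pointer run scan: each run is found by advancing an end pointer, appended immediately, and the scan resumes at end, so no carried state or final flush is needed.
import Mathlib
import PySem

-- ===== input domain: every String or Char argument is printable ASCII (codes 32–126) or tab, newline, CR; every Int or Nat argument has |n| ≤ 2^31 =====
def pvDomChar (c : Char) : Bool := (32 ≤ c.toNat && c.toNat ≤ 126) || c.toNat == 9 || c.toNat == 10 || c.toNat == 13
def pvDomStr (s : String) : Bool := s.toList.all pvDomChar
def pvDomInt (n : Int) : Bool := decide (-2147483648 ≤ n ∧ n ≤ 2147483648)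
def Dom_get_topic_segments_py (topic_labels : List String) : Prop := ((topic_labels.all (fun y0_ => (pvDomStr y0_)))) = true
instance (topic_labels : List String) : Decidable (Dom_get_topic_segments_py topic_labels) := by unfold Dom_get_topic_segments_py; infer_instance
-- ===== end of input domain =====

-- B replaces A's carried current_topic/start_pos state machine (with a post-loop flush)
-- by a two-pointer run scan that appends each run as soon as its end is found: simpler, same O(n) cost.

-- defaultdict(list) append: segments[t].append(seg)  (shared semantics helper for both ports)
def pvApp (d : PySem.Dict String (List (Int × Int))) (t : String) (seg : Int × Int) :
    PySem.Dict String (List (Int × Int)) :=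
  d.modify t [] (fun l => l ++ [seg])

-- ===== PORT A =====
-- loop body of A: 'if topic != current_topic: (flush previous run); current_topic = topic; start_pos = i'
def pvStepA (st : PySem.Dict String (List (Int × Int)) × Option String × Int) (p : Int × String) :
    PySem.Dict String (List (Int × Int)) × Option String × Int :=
  if some p.2 ≠ st.2.1 then
    ((match st.2.1 with
      | none => st.1
      | some t => pvApp st.1 t (st.2.2, p.1)), some p.2, p.1)
  else st

-- "Don't forget the last segment": the flush after A's loop
def pvFin (st : PySem.Dict String (List (Int × Int)) × Option String × Int) (n : Int) :
    PySem.Dict String (List (Int × Int)) :=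
  match st.2.1 with
  | none => st.1
  | some t => pvApp st.1 t (st.2.2, n)

def get_topic_segments_py (topic_labels : List String) : List (String × List (Int × Int)) :=
  (pvFin ((PySem.List.enumerate topic_labels).foldl pvStepA (PySem.Dict.empty, none, 0))
    ((topic_labels.length : Int))).items

-- ===== PORT B =====
-- outer while: one recursive call per run; inner while: advance end past equal labels (takeWhile/dropWhile)
def pvRunB (ls : List String) (pos : Int) (d : PySem.Dict String (List (Int × Int))) :
    PySem.Dict String (List (Int × Int)) :=
  match ls with
  | [] => d
  | x :: xs =>
    let endp := pos + 1 + ((xs.takeWhile (fun y => y == x)).length : Int)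
    pvRunB (xs.dropWhile (fun y => y == x)) endp (pvApp d x (pos, endp))
termination_by ls.length
decreasing_by
  simp only [List.length_cons]
  exact Nat.lt_succ_of_le (xs.length_dropWhile_le _)

def get_topic_segments_py_alt (topic_labels : List String) : List (String × List (Int × Int)) :=
  (pvRunB topic_labels 0 PySem.Dict.empty).items

-- ===== PRECONDITION & SPEC =====
def Spec_get_topic_segments_py (topic_labels : List String) (out : List (String × List (Int × Int))) : Prop := out = get_topic_segments_py_alt topic_labels
instance (topic_labels : List String) (out : List (String × List (Int × Int))) : Decidable (Spec_get_topic_segments_py topic_labels out) := by unfold Spec_get_topic_segments_py; infer_instance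

-- ===== CLAIM (what is proved, stated in full; the proofs are below) =====
def Claim_equal_get_topic_segments_py : Prop := ∀ (topic_labels : List String), Dom_get_topic_segments_py topic_labels → Spec_get_topic_segments_py topic_labels (get_topic_segments_py topic_labels)

-- ===== LEMMAS AND PROOFS =====

-- common element-wise run recursion both ports reduce to: remaining ls at position k,
-- current run has topic t and started at s, d already holds the earlier runs
def pvG : List String → Int → String → Int → PySem.Dict String (List (Int × Int)) →
    PySem.Dict String (List (Int × Int))
  | [], k, t, s, d => pvApp d t (s, k)
  | x :: xs, k, t, s, d =>
    if x = t then pvG xs (k + 1) t s d else pvG xs (k + 1) x k (pvApp d t (s, k))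

-- A's fold, started mid-run, computes pvG
theorem pvA_fold (ls : List String) (k t s d) :
    pvFin ((PySem.List.enumerate ls k).foldl pvStepA (d, some t, s)) (k + (ls.length : Int)) =
      pvG ls k t s d := by
  induction ls generalizing k t s d with
  | nil => simp [pvG, pvFin]
  | cons x xs ih =>
    rw [PySem.List.enumerate_cons, List.foldl_cons]
    by_cases hx : x = t
    · subst hx
      rw [show pvStepA (d, some x, s) (k, x) = (d, some x, s) by simp [pvStepA]]
      rw [show (k + (((x :: xs).length : Nat) : Int)) = (k + 1) + (xs.length : Int) by
        push_cast [List.length_cons]; ring]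
      rw [ih]
      simp [pvG]
    · rw [show pvStepA (d, some t, s) (k, x) = (pvApp d t (s, k), some x, k) by
        simp [pvStepA, hx]]
      rw [show (k + (((x :: xs).length : Nat) : Int)) = (k + 1) + (xs.length : Int) by
        push_cast [List.length_cons]; ring]
      rw [ih]
      simp [pvG, hx]

-- B's run recursion, started mid-run, computes pvG
theorem pvB_run (ls : List String) (k t s d) :
    pvG ls k t s d =
      pvRunB (ls.dropWhile (fun y => y == t))
        (k + ((ls.takeWhile (fun y => y == t)).length : Int))
        (pvApp d t (s, k + ((ls.takeWhile (fun y => y == t)).length : Int))) := by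
  induction ls generalizing k t s d with
  | nil => simp [pvG, pvRunB]
  | cons x xs ih =>
    by_cases hx : x = t
    · subst hx
      simp only [pvG, List.takeWhile_cons, beq_self_eq_true, if_pos,
        List.dropWhile_cons, List.length_cons]
      rw [ih (k + 1) x s d]
      rw [show (k + (((xs.takeWhile (fun y => y == x)).length + 1 : Nat) : Int)) =
          (k + 1) + ((xs.takeWhile (fun y => y == x)).length : Int) by push_cast; ring]
    · have hbe : (x == t) = false := beq_eq_false_iff_ne.mpr hx
      simp only [pvG, if_neg hx, List.takeWhile_cons, hbe, List.dropWhile_cons,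
        Bool.false_eq_true, if_false, List.length_nil, Int.natCast_zero, add_zero]
      rw [ih (k + 1) x k (pvApp d t (s, k)), pvRunB]

-- ===== VERDICT (by name: the statement is the Claim_ definition above) =====
theorem get_topic_segments_py_spec : Claim_equal_get_topic_segments_py := by
  intro ls _
  unfold Spec_get_topic_segments_py get_topic_segments_py get_topic_segments_py_alt
  cases ls with
  | nil => simp [PySem.List.enumerate_nil, pvFin, pvRunB]
  | cons x xs =>
    congr 1
    have he : PySem.List.enumerate (x :: xs) = (0, x) :: PySem.List.enumerate xs 1 := by
      rw [PySem.List.enumerate_cons]; norm_num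
    rw [he, List.foldl_cons,
      show pvStepA (PySem.Dict.empty, none, 0) (0, x) = (PySem.Dict.empty, some x, 0) from rfl,
      show (((x :: xs).length : Nat) : Int) = 1 + (xs.length : Int) by
        push_cast [List.length_cons]; ring,
      pvA_fold xs 1 x 0 PySem.Dict.empty, pvB_run, pvRunB]
    norm_num
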